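-- pv_equiv track=rewrite | github.com/ASHWITHAREDDY510/Swift-AI-visa | data/rag_pipeline.py | _extract_metadata_from_content
-- ===== SOURCE A (Python) =====
-- from typing import List, Dict, Optional
--
-- def _extract_metadata_from_content(content: str) -> Dict[str, str]:
--     """Extract country and visa_type from chunk content header"""
--     result = {"country": "Unknown", "visa_type": "Unknown", "source_file": "Unknown"}
--
--     lines = content.split('\n')[:10]
--
--     # Pattern 1: ## Country - VisaType Visa
--     for line in lines:
--         line = line.strip()
--         if line.startswith('## ') and '-' in line:
--             parts = line.replace('##', '').strip().split('-')
--             if len(parts) >= 2: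
--                 result["country"] = parts[0].strip()
--                 visa = parts[1].replace('Visa', '').strip()
--                 result["visa_type"] = visa if visa else "Unknown"
--                 break
--
--     # Pattern 2: ### Source: filename.txt
--     for line in lines:
--         if line.startswith('### Source:'):
--             result["source_file"] = line.replace('### Source:', '').strip()
--             break
--
--     return result
-- ===== SOURCE B (Python) =====
-- def _match_header(line):
--     stripped = line.strip()
--     if stripped.startswith('## ') and '-' in stripped:
--         parts = stripped.replace('##', '').strip().split('-')
--         if len(parts) >= 2:
--             visa = parts[1].replace('Visa', '').strip()
--             return (parts[0].strip(), visa if visa else "Unknown")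
--     return None
--
--
-- def _match_source(line):
--     if line.startswith('### Source:'):
--         return line.replace('### Source:', '').strip()
--     return None
--
--
-- def _extract_metadata_from_content(content: str) -> dict:
--     """Extract country and visa_type from chunk content header (single pass)."""
--     header = None
--     source = None
--     for line in content.split('\n')[:10]:
--         if header is not None and source is not None:
--             break
--         if header is None:
--             header = _match_header(line)
--         if source is None:
--             source = _match_source(line)
--     country, visa_type = header if header is not None else ("Unknown", "Unknown")
--     return {"country": country,
--             "visa_type": visa_type,
--             "source_file": source if source is not None else "Unknown"}
-- ===== Notes on version B (the rewrite author's own statement) =====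
-- stated objective: alternative
-- what changed: The two sequential scans over the first 10 lines are replaced by a single traversal with per-line matcher helpers and two found-flags that breaks as soon as both the header and the source line are found.
import Mathlib
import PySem

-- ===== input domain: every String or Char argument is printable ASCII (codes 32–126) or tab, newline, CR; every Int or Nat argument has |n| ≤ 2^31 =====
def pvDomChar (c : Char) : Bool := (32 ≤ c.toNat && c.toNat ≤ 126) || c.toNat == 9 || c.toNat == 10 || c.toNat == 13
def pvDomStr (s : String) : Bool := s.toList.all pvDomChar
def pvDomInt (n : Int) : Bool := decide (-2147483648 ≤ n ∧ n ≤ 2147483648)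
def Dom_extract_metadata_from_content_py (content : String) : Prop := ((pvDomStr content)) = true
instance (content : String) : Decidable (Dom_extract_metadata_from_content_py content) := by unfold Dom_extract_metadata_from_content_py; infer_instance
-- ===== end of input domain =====

-- B is an alternative decomposition: one traversal with two found-flags instead of A's two sequential scans.

-- ===== PORT A =====
-- Pattern-1 loop of A: first line whose strip starts with '## ' and contains '-' and splits into ≥ 2 parts.
def pvALoop1 : List String → Option (String × String)
  | [] => none
  | l :: rest =>
    let line := PySem.Str.strip l
    if PySem.Str.startswith line "## " && PySem.Str.isIn "-" line then
      match (PySem.Str.split? (PySem.Str.strip (PySem.Str.replace line "##" "")) "-").getD [] with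
      | p0 :: p1 :: _ =>
        let visa := PySem.Str.strip (PySem.Str.replace p1 "Visa" "")
        some (PySem.Str.strip p0, if visa = "" then "Unknown" else visa)
      | _ => pvALoop1 rest
    else pvALoop1 rest

-- Pattern-2 loop of A: first RAW line starting with '### Source:'.
def pvALoop2 : List String → Option String
  | [] => none
  | l :: rest =>
    if PySem.Str.startswith l "### Source:" then
      some (PySem.Str.strip (PySem.Str.replace l "### Source:" ""))
    else pvALoop2 rest

def extract_metadata_from_content_py (content : String) : List (String × String) :=
  let lines := PySem.List.slice ((PySem.Str.split? content "\n").getD []) none (some 10)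
  let r1 := pvALoop1 lines
  let r2 := pvALoop2 lines
  [("country", (r1.map Prod.fst).getD "Unknown"),
   ("visa_type", (r1.map Prod.snd).getD "Unknown"),
   ("source_file", r2.getD "Unknown")]

-- ===== PORT B =====
def pvMatchHeader (l : String) : Option (String × String) :=
  let stripped := PySem.Str.strip l
  if PySem.Str.startswith stripped "## " && PySem.Str.isIn "-" stripped then
    match (PySem.Str.split? (PySem.Str.strip (PySem.Str.replace stripped "##" "")) "-").getD [] with
    | p0 :: p1 :: _ =>
      let visa := PySem.Str.strip (PySem.Str.replace p1 "Visa" "")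
      some (PySem.Str.strip p0, if visa = "" then "Unknown" else visa)
    | _ => none
  else none

def pvMatchSource (l : String) : Option String :=
  if PySem.Str.startswith l "### Source:" then
    some (PySem.Str.strip (PySem.Str.replace l "### Source:" ""))
  else none

-- single pass with two found-flags, early break when both are set
def pvBLoop : List String → Option (String × String) → Option String → Option (String × String) × Option String
  | [], header, source => (header, source)
  | l :: rest, header, source =>
    if header.isSome && source.isSome then (header, source)
    else
      let header' := if header.isSome then header else pvMatchHeader l
      let source' := if source.isSome then source else pvMatchSource l
      pvBLoop rest header' source'

def extract_metadata_from_content_py_alt (content : String) : List (String × String) :=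
  let lines := ((PySem.Str.split? content "\n").getD []).take 10
  let r := pvBLoop lines none none
  let cv := r.1.getD ("Unknown", "Unknown")
  [("country", cv.1), ("visa_type", cv.2), ("source_file", r.2.getD "Unknown")]

-- ===== PRECONDITION & SPEC =====
def Spec_extract_metadata_from_content_py (content : String) (out : List (String × String)) : Prop := out = extract_metadata_from_content_py_alt content
instance (content : String) (out : List (String × String)) : Decidable (Spec_extract_metadata_from_content_py content out) := by unfold Spec_extract_metadata_from_content_py; infer_instance

-- ===== CLAIM (what is proved, stated in full; the proofs are below) =====
def Claim_equal_extract_metadata_from_content_py : Prop := ∀ (content : String), Dom_extract_metadata_from_content_py content → Spec_extract_metadata_from_content_py content (extract_metadata_from_content_py content)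

-- ===== LEMMAS AND PROOFS =====

lemma pvALoop1_cons (l : String) (rest : List String) :
    pvALoop1 (l :: rest) = (pvMatchHeader l).orElse (fun _ => pvALoop1 rest) := by
  conv_lhs => rw [pvALoop1]
  rw [pvMatchHeader]
  by_cases hc : (PySem.Str.startswith (PySem.Str.strip l) "## "
      && PySem.Str.isIn "-" (PySem.Str.strip l)) = true
  · rw [if_pos hc, if_pos hc]
    cases hp : (PySem.Str.split? (PySem.Str.strip (PySem.Str.replace (PySem.Str.strip l) "##" "")) "-").getD [] with
    | nil => rfl
    | cons p0 t =>
      cases t with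
      | nil => rfl
      | cons p1 t2 => rfl
  · rw [if_neg hc, if_neg hc]
    rfl

lemma pvALoop2_cons (l : String) (rest : List String) :
    pvALoop2 (l :: rest) = (pvMatchSource l).orElse (fun _ => pvALoop2 rest) := by
  conv_lhs => rw [pvALoop2]
  rw [pvMatchSource]
  by_cases hc : PySem.Str.startswith l "### Source:" = true
  · rw [if_pos hc, if_pos hc]
    rfl
  · rw [if_neg hc, if_neg hc]
    rfl

lemma pvBLoop_eq (lines : List String) :
    ∀ header source, pvBLoop lines header source
      = (header.orElse (fun _ => pvALoop1 lines), source.orElse (fun _ => pvALoop2 lines)) := by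
  induction lines with
  | nil => intro header source; cases header <;> cases source <;> rfl
  | cons l rest ih =>
    intro header source
    rw [pvALoop1_cons, pvALoop2_cons, pvBLoop]
    cases header with
    | some h =>
      cases source with
      | some s => rfl
      | none => rw [ih]; cases pvMatchSource l <;> rfl
    | none =>
      cases source with
      | some s => rw [ih]; cases pvMatchHeader l <;> rfl
      | none => rw [ih]; cases pvMatchHeader l <;> cases pvMatchSource l <;> rfl

-- ===== VERDICT (by name: the statement is the Claim_ definition above) =====
theorem extract_metadata_from_content_py_spec : Claim_equal_extract_metadata_from_content_py := by
  intro content _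
  have hs : PySem.List.slice ((PySem.Str.split? content "\n").getD []) none (some (10 : Int))
      = ((PySem.Str.split? content "\n").getD []).take 10 := by
    rw [PySem.List.slice_to _ (by norm_num)]
    rfl
  unfold Spec_extract_metadata_from_content_py extract_metadata_from_content_py extract_metadata_from_content_py_alt
  simp only [hs, pvBLoop_eq]
  cases pvALoop1 (((PySem.Str.split? content "\n").getD []).take 10) <;>
    cases pvALoop2 (((PySem.Str.split? content "\n").getD []).take 10) <;> simp
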